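-- pv_equiv track=rewrite | github.com/odashi/chainer_nmt | lib/batch.py | _make_batch
-- ===== SOURCE A (Python) =====
-- def _make_batch(samples, pad_id):
--   batch_size = len(samples)
--   max_src_length = max(len(sample[0]) for sample in samples)
--   max_trg_length = max(len(sample[1]) for sample in samples)
--   src_batch = [[pad_id] * batch_size for _ in range(max_src_length)]
--   trg_batch = [[pad_id] * batch_size for _ in range(max_trg_length)]
--   for i, (src_sample, trg_sample) in enumerate(samples):
--     for j, w in enumerate(src_sample):
--       src_batch[j][i] = w
--     for j, w in enumerate(trg_sample):
--       trg_batch[j][i] = w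
--   return src_batch, trg_batch
-- ===== SOURCE B (Python) =====
-- from itertools import zip_longest
--
-- def _make_batch(samples, pad_id):
--   max_src_length = max(len(sample[0]) for sample in samples)
--   max_trg_length = max(len(sample[1]) for sample in samples)
--   src_samples = [sample[0] for sample in samples]
--   trg_samples = [sample[1] for sample in samples]
--   src_batch = [list(col) for col in zip_longest(*src_samples, fillvalue=pad_id)]
--   trg_batch = [list(col) for col in zip_longest(*trg_samples, fillvalue=pad_id)]
--   return src_batch, trg_batch
-- ===== Notes on version B (the rewrite author's own statement) =====
-- stated objective: idiomatic
-- what changed: B builds each padded matrix column-by-column by transposing the samples with itertools.zip_longest (fillvalue=pad_id) instead of pre-allocating pad-filled rows and scattering every word into place with nested index assignments; Pre_ excludes only empty samples, where both raise ValueError from max().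
import Mathlib
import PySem

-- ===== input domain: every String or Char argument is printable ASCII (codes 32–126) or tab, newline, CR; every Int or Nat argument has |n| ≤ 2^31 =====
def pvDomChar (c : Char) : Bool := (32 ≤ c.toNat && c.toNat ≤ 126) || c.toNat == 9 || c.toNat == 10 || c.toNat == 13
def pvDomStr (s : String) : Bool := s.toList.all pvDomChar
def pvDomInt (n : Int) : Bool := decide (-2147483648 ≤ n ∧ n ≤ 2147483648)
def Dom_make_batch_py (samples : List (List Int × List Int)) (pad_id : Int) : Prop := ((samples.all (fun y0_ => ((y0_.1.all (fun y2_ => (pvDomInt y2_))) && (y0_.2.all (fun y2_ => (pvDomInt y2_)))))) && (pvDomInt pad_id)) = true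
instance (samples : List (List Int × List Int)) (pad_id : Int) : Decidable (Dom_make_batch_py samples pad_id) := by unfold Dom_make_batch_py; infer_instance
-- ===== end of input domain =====

-- B builds each padded matrix column-by-column via a zip_longest transpose instead of A's
-- pre-allocated rows with nested scatter assignments (objective: idiomatic, same cost).

-- ===== PORT A =====
-- Python `max(...)` over the list of lengths; exact on nonempty lists of Nats (Pre_ excludes []).
def pyMaxNat (l : List Nat) : Nat := l.foldl Nat.max 0

-- inner loop `for j, w in enumerate(ws): mat[j][i] = w`
def scatterCol (i j : Nat) (ws : List Int) (mat : List (List Int)) : List (List Int) :=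
  match ws with
  | [] => mat
  | w :: rest => scatterCol i (j + 1) rest (mat.modify j (fun row => row.set i w))

-- outer loop `for i, (src_sample, trg_sample) in enumerate(samples): ...`
def fillLoop (i : Nat) (ss : List (List Int × List Int)) (srcM trgM : List (List Int)) :
    List (List Int) × List (List Int) :=
  match ss with
  | [] => (srcM, trgM)
  | (s, t) :: rest => fillLoop (i + 1) rest (scatterCol i 0 s srcM) (scatterCol i 0 t trgM)

def make_batch_py (samples : List (List Int × List Int)) (pad_id : Int) : List (List Int) × List (List Int) :=
  let batch_size := samples.length
  let max_src_length := pyMaxNat (samples.map (fun sample => sample.1.length))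
  let max_trg_length := pyMaxNat (samples.map (fun sample => sample.2.length))
  let src_batch := List.replicate max_src_length (List.replicate batch_size pad_id)
  let trg_batch := List.replicate max_trg_length (List.replicate batch_size pad_id)
  fillLoop 0 samples src_batch trg_batch

-- ===== PORT B =====
-- `[list(col) for col in zip_longest(*rows, fillvalue=pad)]`: for each j below the max length,
-- the column of j-th elements, exhausted rows contributing pad.
def zipLongestCols (rows : List (List Int)) (pad : Int) : List (List Int) :=
  (List.range (pyMaxNat (rows.map List.length))).map (fun j => rows.map (fun r => r.getD j pad))

def make_batch_py_alt (samples : List (List Int × List Int)) (pad_id : Int) : List (List Int) × List (List Int) :=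
  let src_samples := samples.map (fun sample => sample.1)
  let trg_samples := samples.map (fun sample => sample.2)
  (zipLongestCols src_samples pad_id, zipLongestCols trg_samples pad_id)

-- ===== PRECONDITION & SPEC =====
-- Pre_ excludes only samples = [], where Python A (and B) raise ValueError from max() on an empty sequence.
def Pre_make_batch_py (samples : List (List Int × List Int)) (_pad_id : Int) : Prop := samples ≠ []
instance (samples : List (List Int × List Int)) (pad_id : Int) : Decidable (Pre_make_batch_py samples pad_id) := by unfold Pre_make_batch_py; infer_instance
def pvWitness_make_batch_py : (List (List Int × List Int)) × Int := ([([1, 2], [3])], 0)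

def Spec_make_batch_py (samples : List (List Int × List Int)) (pad_id : Int) (out : List (List Int) × List (List Int)) : Prop := out = make_batch_py_alt samples pad_id
instance (samples : List (List Int × List Int)) (pad_id : Int) (out : List (List Int) × List (List Int)) : Decidable (Spec_make_batch_py samples pad_id out) := by unfold Spec_make_batch_py; infer_instance

-- ===== CLAIM (what is proved, stated in full; the proofs are below) =====
def Claim_equal_make_batch_py : Prop := ∀ (samples : List (List Int × List Int)) (pad_id : Int), Dom_make_batch_py samples pad_id → Pre_make_batch_py samples pad_id → Spec_make_batch_py samples pad_id (make_batch_py samples pad_id)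

-- ===== LEMMAS AND PROOFS =====

lemma le_foldl_max_init (l : List Nat) : ∀ a : Nat, a ≤ l.foldl Nat.max a := by
  induction l with
  | nil => intro a; simp
  | cons x xs ih => intro a; exact le_trans (Nat.le_max_left a x) (ih (Nat.max a x))

lemma mem_le_foldl_max : ∀ (l : List Nat) (a x : Nat), x ∈ l → x ≤ l.foldl Nat.max a := by
  intro l
  induction l with
  | nil => intro a x hx; cases hx
  | cons y ys ih =>
    intro a x hx
    rcases List.mem_cons.mp hx with h | h
    · subst h
      exact le_trans (Nat.le_max_right a x) (le_foldl_max_init ys _)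
    · exact ih _ x h

lemma mem_le_pyMaxNat (l : List Nat) (x : Nat) (hx : x ∈ l) : x ≤ pyMaxNat l :=
  mem_le_foldl_max l 0 x hx

lemma scatterCol_length (i : Nat) : ∀ (ws : List Int) (j : Nat) (mat : List (List Int)),
    (scatterCol i j ws mat).length = mat.length := by
  intro ws
  induction ws with
  | nil => intro j mat; rfl
  | cons w rest ih => intro j mat; simp [scatterCol, ih, List.length_modify]

lemma scatterCol_getElem? (i : Nat) : ∀ (ws : List Int) (j : Nat) (mat : List (List Int)) (j' : Nat),
    (scatterCol i j ws mat)[j']? =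
      if j ≤ j' ∧ j' < j + ws.length
      then (mat[j']?).map (fun row => row.set i (ws.getD (j' - j) 0))
      else mat[j']? := by
  intro ws
  induction ws with
  | nil =>
    intro j mat j'
    rw [scatterCol, if_neg (by simp only [List.length_nil]; omega)]
  | cons w rest ih =>
    intro j mat j'
    rw [scatterCol, ih]
    by_cases hj : j' = j
    · subst hj
      rw [if_neg (by omega), if_pos (by simp only [List.length_cons]; omega)]
      simp
    · rw [List.getElem?_modify]
      have hne : ¬ j = j' := fun h => hj h.symm
      simp only [hne, if_false]
      by_cases hc : j + 1 ≤ j' ∧ j' < j + 1 + rest.length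
      · rw [if_pos hc, if_pos (by simp only [List.length_cons]; omega)]
        have h1 : j' - j = (j' - (j + 1)) + 1 := by omega
        rw [h1]
        simp
      · rw [if_neg hc, if_neg (by simp only [List.length_cons]; omega)]
        simp

lemma scatterCol_rowlen (i : Nat) (ws : List Int) (j : Nat) (mat : List (List Int)) (n : Nat)
    (h : ∀ (j' : Nat) (r : List Int), mat[j']? = some r → r.length = n) :
    ∀ (j' : Nat) (r : List Int), (scatterCol i j ws mat)[j']? = some r → r.length = n := by
  intro j' r hr
  rw [scatterCol_getElem?] at hr
  by_cases hc : j ≤ j' ∧ j' < j + ws.length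
  · rw [if_pos hc] at hr
    cases hmat : mat[j']? with
    | none => rw [hmat] at hr; simp at hr
    | some row =>
      rw [hmat] at hr
      simp only [Option.map_some, Option.some.injEq] at hr
      subst hr
      rw [List.length_set]
      exact h _ _ hmat
  · rw [if_neg hc] at hr
    exact h _ _ hr

-- src and trg matrices are updated independently: split A's interleaved loop into two folds
def fillS (i : Nat) (ss : List (List Int)) (mat : List (List Int)) : List (List Int) :=
  match ss with
  | [] => mat
  | ws :: rest => fillS (i + 1) rest (scatterCol i 0 ws mat)

lemma fillLoop_eq : ∀ (ss : List (List Int × List Int)) (i : Nat) (srcM trgM : List (List Int)),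
    fillLoop i ss srcM trgM = (fillS i (ss.map Prod.fst) srcM, fillS i (ss.map Prod.snd) trgM) := by
  intro ss
  induction ss with
  | nil => intro i srcM trgM; rfl
  | cons p rest ih =>
    intro i srcM trgM
    obtain ⟨s, t⟩ := p
    simp [fillLoop, fillS, ih]

lemma fillS_length : ∀ (ss : List (List Int)) (i : Nat) (mat : List (List Int)),
    (fillS i ss mat).length = mat.length := by
  intro ss
  induction ss with
  | nil => intro i mat; rfl
  | cons ws rest ih => intro i mat; rw [fillS, ih, scatterCol_length]

def get2 (mat : List (List Int)) (j k : Nat) : Option Int := (mat[j]?).bind (fun r => r[k]?)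

lemma fillS_get2 (n : Nat) : ∀ (ss : List (List Int)) (i : Nat) (mat : List (List Int)) (j k : Nat),
    (∀ (j' : Nat) (r : List Int), mat[j']? = some r → r.length = n) →
    (∀ ws ∈ ss, ws.length ≤ mat.length) →
    i + ss.length ≤ n →
    get2 (fillS i ss mat) j k =
      if i ≤ k ∧ k < i + ss.length ∧ j < (ss.getD (k - i) []).length
      then some ((ss.getD (k - i) []).getD j 0)
      else get2 mat j k := by
  intro ss
  induction ss with
  | nil =>
    intro i mat j k _ _ _
    rw [fillS, if_neg (by simp only [List.length_nil, List.getD_nil]; omega)]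
  | cons ws rest ih =>
    intro i mat j k hrow hle hn
    have hrow' := scatterCol_rowlen i ws 0 mat n hrow
    have hlen' : (scatterCol i 0 ws mat).length = mat.length := scatterCol_length i ws 0 mat
    have hle' : ∀ w ∈ rest, w.length ≤ (scatterCol i 0 ws mat).length := by
      rw [hlen']; exact fun w hw => hle w (List.mem_cons_of_mem _ hw)
    rw [fillS, ih (i + 1) _ j k hrow' hle' (by simp at hn ⊢; omega)]
    by_cases hk : k = i
    · subst hk
      rw [if_neg (by omega)]
      simp only [Nat.sub_self, List.getD_cons_zero]
      have hin : k < n := by simp only [List.length_cons] at hn; omega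
      by_cases hj : j < ws.length
      · rw [if_pos ⟨le_refl _, by simp only [List.length_cons]; omega, hj⟩]
        have hjm : j < mat.length := lt_of_lt_of_le hj (hle ws (by simp))
        have hrowj : mat[j]? = some (mat[j]'hjm) := List.getElem?_eq_getElem hjm
        unfold get2
        rw [scatterCol_getElem?, if_pos ⟨Nat.zero_le _, by omega⟩, hrowj]
        simp only [Nat.sub_zero, Option.map_some]
        show ((mat[j]'hjm).set k (ws.getD j 0))[k]? = some (ws.getD j 0)
        rw [List.getElem?_set, if_pos rfl, if_pos (by rw [hrow _ _ hrowj]; exact hin)]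
      · rw [if_neg (by rintro ⟨-, -, h⟩; omega)]
        unfold get2
        rw [scatterCol_getElem?, if_neg (by omega)]
    · -- column k untouched by scatterCol at column i
      have hcol : get2 (scatterCol i 0 ws mat) j k = get2 mat j k := by
        unfold get2
        rw [scatterCol_getElem?]
        by_cases hc : 0 ≤ j ∧ j < 0 + ws.length
        · rw [if_pos hc]
          cases hmat : mat[j]? with
          | none => simp
          | some row =>
            have hik : i ≠ k := Ne.symm hk
            simp [hik]
        · rw [if_neg hc]
      rw [hcol]
      by_cases hc2 : i + 1 ≤ k ∧ k < i + 1 + rest.length ∧ j < (rest.getD (k - (i + 1)) []).length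
      · have h1 : k - i = (k - (i + 1)) + 1 := by omega
        have hC : i ≤ k ∧ k < i + (ws :: rest).length ∧ j < ((ws :: rest).getD (k - i) []).length := by
          refine ⟨by omega, by simp only [List.length_cons]; omega, ?_⟩
          rw [h1, List.getD_cons_succ]
          exact hc2.2.2
        rw [if_pos hc2, if_pos hC, h1, List.getD_cons_succ]
      · have hC : ¬ (i ≤ k ∧ k < i + (ws :: rest).length ∧ j < ((ws :: rest).getD (k - i) []).length) := by
          rintro ⟨ha, hb, hcj⟩
          have h1 : k - i = (k - (i + 1)) + 1 := by omega
          rw [h1, List.getD_cons_succ] at hcj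
          simp only [List.length_cons] at hb
          exact hc2 ⟨by omega, by omega, hcj⟩
        rw [if_neg hc2, if_neg hC]

lemma fillS_eq_cols (rows : List (List Int)) (pad : Int) :
    fillS 0 rows (List.replicate (pyMaxNat (rows.map List.length)) (List.replicate rows.length pad))
      = zipLongestCols rows pad := by
  set M := pyMaxNat (rows.map List.length) with hM
  set n := rows.length with hn
  set mat0 := List.replicate M (List.replicate n pad) with hmat0
  have hrow0 : ∀ (j' : Nat) (r : List Int), mat0[j']? = some r → r.length = n := by
    intro j' r hr
    rw [hmat0, List.getElem?_replicate] at hr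
    by_cases h : j' < M
    · rw [if_pos h] at hr
      cases hr
      exact List.length_replicate
    · rw [if_neg h] at hr; cases hr
  have hle0 : ∀ ws ∈ rows, ws.length ≤ mat0.length := by
    intro ws hws
    rw [hmat0, List.length_replicate, hM]
    exact mem_le_pyMaxNat _ _ (List.mem_map_of_mem hws)
  have hlen : (fillS 0 rows mat0).length = M := by
    rw [fillS_length, hmat0, List.length_replicate]
  have hRlen : (zipLongestCols rows pad).length = M := by
    rw [zipLongestCols, List.length_map, List.length_range, hM]
  apply List.ext_getElem?
  intro j
  by_cases hj : j < M
  · have hR : (zipLongestCols rows pad)[j]? = some (rows.map fun r => r.getD j pad) := by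
      rw [zipLongestCols, List.getElem?_map, ← hM, List.getElem?_range hj]
      rfl
    cases hL : (fillS 0 rows mat0)[j]? with
    | none => rw [List.getElem?_eq_none_iff, hlen] at hL; omega
    | some r =>
      rw [hR]
      congr 1
      apply List.ext_getElem?
      intro k
      have hg2 : get2 (fillS 0 rows mat0) j k = r[k]? := by unfold get2; rw [hL]; rfl
      rw [← hg2, fillS_get2 n rows 0 mat0 j k hrow0 hle0 (by omega)]
      simp only [Nat.sub_zero]
      by_cases hk : k < n
      · have hkr : k < rows.length := by omega
        have hrk : rows[k]? = some (rows[k]'hkr) := List.getElem?_eq_getElem hkr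
        have hgd : rows.getD k [] = rows[k]'hkr := by
          rw [List.getD_eq_getElem?_getD, hrk]
          rfl
        rw [List.getElem?_map, hrk]
        simp only [Option.map_some]
        by_cases hjk : j < (rows[k]'hkr).length
        · rw [if_pos ⟨Nat.zero_le _, by omega, by rw [hgd]; exact hjk⟩, hgd]
          congr 1
          rw [List.getD_eq_getElem?_getD, List.getD_eq_getElem?_getD, List.getElem?_eq_getElem hjk]
          rfl
        · rw [if_neg (by rw [hgd]; rintro ⟨-, -, h⟩; exact hjk h)]
          have hpad : get2 mat0 j k = some pad := by
            unfold get2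
            rw [hmat0, List.getElem?_replicate, if_pos hj]
            show (List.replicate n pad)[k]? = some pad
            rw [List.getElem?_replicate, if_pos hk]
          rw [hpad]
          congr 1
          rw [List.getD_eq_getElem?_getD, List.getElem?_eq_none (by omega)]
          rfl
      · rw [if_neg (by rintro ⟨-, h, -⟩; omega)]
        have h0 : get2 mat0 j k = none := by
          unfold get2
          rw [hmat0, List.getElem?_replicate, if_pos hj]
          show (List.replicate n pad)[k]? = none
          rw [List.getElem?_replicate, if_neg hk]
        rw [h0, List.getElem?_map, List.getElem?_eq_none (by omega)]
        rfl
  · rw [List.getElem?_eq_none (by omega), List.getElem?_eq_none (by omega)]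

-- ===== VERDICT (by name: the statement is the Claim_ definition above) =====
theorem make_batch_py_spec : Claim_equal_make_batch_py := by
  intro samples pad_id _ _
  unfold Spec_make_batch_py make_batch_py make_batch_py_alt
  rw [fillLoop_eq]
  have e1 := fillS_eq_cols (samples.map Prod.fst) pad_id
  have e2 := fillS_eq_cols (samples.map Prod.snd) pad_id
  rw [List.length_map, List.map_map] at e1 e2
  exact Prod.ext e1 e2
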